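-- pv_equiv track=rewrite | github.com/AustinJunyuLi/SEC_extract | api_extractor.py | _find_background_start
-- ===== SOURCE A (Python) =====
-- def _find_background_start(pages: list[dict]) -> int:
--     patterns = [
--         "Background of the Merger",
--         "Background of the Offer",
--         "Background of the Transaction",
--         "Background of the Acquisition",
--         "Background of the Proposed Merger",
--         "Background of the Proposed Transaction",
--         "Background of Offer and Merger",
--     ]
--     hits = []
--     for i, p in enumerate(pages):
--         c = p.get("content", "")
--         for phrase in patterns:
--             if phrase in c:
--                 hits.append(i)
--                 break
--     if not hits:
--         return 0
--     # Prefer the LAST occurrence (body) over TOC hits earlier in the doc.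
--     return hits[-1] if len(hits) == 1 else hits[-1]
-- ===== SOURCE B (Python) =====
-- def _find_background_start(pages: list[dict]) -> int:
--     patterns = [
--         "Background of the Merger",
--         "Background of the Offer",
--         "Background of the Transaction",
--         "Background of the Acquisition",
--         "Background of the Proposed Merger",
--         "Background of the Proposed Transaction",
--         "Background of Offer and Merger",
--     ]
--     for i, p in reversed(list(enumerate(pages))):
--         c = p.get("content", "")
--         if any(phrase in c for phrase in patterns):
--             return i
--     return 0
-- ===== Notes on version B (the rewrite author's own statement) =====
-- stated objective: simpler
-- what changed: Replaced the forward pass that accumulates a hits list (returning hits[-1]) with a reverse scan that returns the first matching page index immediately, dropping the accumulator.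
import Mathlib
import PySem

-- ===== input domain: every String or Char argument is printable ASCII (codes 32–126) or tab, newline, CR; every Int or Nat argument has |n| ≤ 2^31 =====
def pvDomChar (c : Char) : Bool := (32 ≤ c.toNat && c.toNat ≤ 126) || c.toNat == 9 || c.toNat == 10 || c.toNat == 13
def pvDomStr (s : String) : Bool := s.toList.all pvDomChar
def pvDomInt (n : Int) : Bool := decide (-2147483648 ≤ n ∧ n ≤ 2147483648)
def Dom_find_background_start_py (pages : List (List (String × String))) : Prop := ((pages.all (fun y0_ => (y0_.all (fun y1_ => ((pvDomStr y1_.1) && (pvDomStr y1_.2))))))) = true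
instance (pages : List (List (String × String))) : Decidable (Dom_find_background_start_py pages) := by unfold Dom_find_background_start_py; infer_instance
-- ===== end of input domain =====

-- B drops A's forward pass with a hits accumulator and instead scans the pages in reverse,
-- returning the first (i.e. last) matching page index immediately; objective: simpler.

-- the patterns list and the per-page check, identical in both Pythons
def pvPatterns : List String := [
  "Background of the Merger",
  "Background of the Offer",
  "Background of the Transaction",
  "Background of the Acquisition",
  "Background of the Proposed Merger",
  "Background of the Proposed Transaction",
  "Background of Offer and Merger"]

-- 'c = p.get("content", ""); for phrase in patterns: if phrase in c: … break' — the inner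
-- loop with break is exactly 'any'
def pvPageHit (p : List (String × String)) : Bool :=
  let c := (PySem.Dict.mk p).getD "content" ""
  pvPatterns.any (fun phrase => PySem.Str.isIn phrase c)

-- ===== PORT A =====
def find_background_start_py (pages : List (List (String × String))) : Int :=
  let hits : List Int := (PySem.List.enumerate pages 0).foldl
    (fun hits ip => if pvPageHit ip.2 then hits ++ [ip.1] else hits) []
  if hits = [] then 0
  else if hits.length == 1 then (PySem.List.pyGet? hits (-1)).getD 0  -- hits[-1]; hits ≠ [] so never the default
  else (PySem.List.pyGet? hits (-1)).getD 0

-- ===== PORT B =====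
def pvAltGo : List (Int × List (String × String)) → Int
  | [] => 0
  | (i, p) :: rest => if pvPageHit p then i else pvAltGo rest

def find_background_start_py_alt (pages : List (List (String × String))) : Int :=
  pvAltGo (PySem.List.enumerate pages 0).reverse

-- ===== PRECONDITION & SPEC =====
def Spec_find_background_start_py (pages : List (List (String × String))) (out : Int) : Prop := out = find_background_start_py_alt pages
instance (pages : List (List (String × String))) (out : Int) : Decidable (Spec_find_background_start_py pages out) := by unfold Spec_find_background_start_py; infer_instance

-- ===== CLAIM (what is proved, stated in full; the proofs are below) =====
def Claim_equal_find_background_start_py : Prop := ∀ (pages : List (List (String × String))), Dom_find_background_start_py pages → Spec_find_background_start_py pages (find_background_start_py pages)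

-- ===== LEMMAS AND PROOFS =====

-- B's reverse scan returns the LAST matching index of the original list (default 0)
theorem pvAltGo_eq_last (l : List (Int × List (String × String))) :
    pvAltGo l.reverse = (((l.filter (fun ip => pvPageHit ip.2)).map (·.1)).getLast?).getD 0 := by
  induction l using List.reverseRecOn with
  | nil => simp [pvAltGo]
  | append_singleton xs x ih =>
      obtain ⟨i, p⟩ := x
      by_cases h : pvPageHit p
      · simp [pvAltGo, h]
      · simp [pvAltGo, h, ih]

theorem find_background_start_py_eq_last (pages : List (List (String × String))) :
    find_background_start_py pages =
      ((((PySem.List.enumerate pages 0).filter (fun ip => pvPageHit ip.2)).map (·.1)).getLast?).getD 0 := by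
  unfold find_background_start_py
  rw [PySem.List.foldl_append_if]
  simp only [List.nil_append]
  set m := ((PySem.List.enumerate pages 0).filter (fun ip => pvPageHit ip.2)).map (·.1) with hm
  by_cases h : m = []
  · simp [h]
  · simp [h, PySem.List.pyGet?_neg_one]

-- ===== VERDICT (by name: the statement is the Claim_ definition above) =====
theorem find_background_start_py_spec : Claim_equal_find_background_start_py := by
  intro pages _
  unfold Spec_find_background_start_py find_background_start_py_alt
  rw [pvAltGo_eq_last, find_background_start_py_eq_last]
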